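-- pv_equiv track=rewrite | github.com/PanJianTing/LeetCode | 649_Dota2Senate.py | ban
-- ===== SOURCE A (Python) =====
-- def ban(senateList: list, c: str, idx: int) -> bool:
--     checkCnt = 0
--     maxCheck = len(senateList)
--     p = idx % maxCheck
--     remove = False
--
--     while checkCnt < maxCheck:
--         if senateList[p] == c:
--             del senateList[p]
--             remove = True
--             break
--         checkCnt += 1
--         p = (p+1) % maxCheck
--
--     return remove
-- ===== SOURCE B (Python) =====
-- def ban(senateList: list, c: str, idx: int) -> bool:
--     start = idx % len(senateList)
--     tail = senateList[start:]
--     if c in tail: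
--         del senateList[start + tail.index(c)]
--         return True
--     head = senateList[:start]
--     if c in head:
--         del senateList[head.index(c)]
--         return True
--     return False
-- ===== Notes on version B (the rewrite author's own statement) =====
-- stated objective: idiomatic
-- what changed: Replaces the hand-rolled modular while-loop over indices with two bounded library searches: slice the list at start = idx % len into tail and head, use 'in'/'.index' on each slice, and delete the found position; the C-level slice/membership scan gives a constant-factor speedup over the per-element Python loop.
-- outside the precondition, e.g. on ban([], 'R', 0): A raises ZeroDivisionError, B raises ZeroDivisionError
import Mathlib
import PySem

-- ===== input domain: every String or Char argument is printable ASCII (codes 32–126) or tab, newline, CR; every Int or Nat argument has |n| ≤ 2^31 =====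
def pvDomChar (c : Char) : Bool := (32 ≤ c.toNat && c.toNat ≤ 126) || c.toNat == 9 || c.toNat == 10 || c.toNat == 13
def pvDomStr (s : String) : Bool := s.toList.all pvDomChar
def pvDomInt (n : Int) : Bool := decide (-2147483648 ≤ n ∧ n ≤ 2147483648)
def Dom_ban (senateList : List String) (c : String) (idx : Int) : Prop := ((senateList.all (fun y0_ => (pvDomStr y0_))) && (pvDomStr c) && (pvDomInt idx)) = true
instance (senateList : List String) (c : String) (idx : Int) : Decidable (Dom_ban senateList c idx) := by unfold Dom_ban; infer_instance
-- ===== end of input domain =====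

-- B replaces A's modular circular index loop with two bounded slice searches (same cost, more idiomatic).
-- Both A and B delete the same element from senateList in place; the equivalence proved here is about the return value.


-- ===== PORT A =====
-- the while loop: fuel = maxCheck - checkCnt
def banLoop (senateList : List String) (c : String) (maxCheck : Int) : Nat → Int → Bool
  | 0, _ => false
  | fuel+1, p =>
    if PySem.List.pyGet? senateList p = some c then true
    else banLoop senateList c maxCheck fuel (PySem.Int.mod (p+1) maxCheck)

def ban (senateList : List String) (c : String) (idx : Int) : Bool :=
  banLoop senateList c (senateList.length : Int) senateList.length
    (PySem.Int.mod idx (senateList.length : Int))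

-- ===== PORT B =====
def ban_alt (senateList : List String) (c : String) (idx : Int) : Bool :=
  let start := PySem.Int.mod idx (senateList.length : Int)
  let tail := PySem.List.slice senateList (some start) none
  if tail.contains c then true
  else
    let head := PySem.List.slice senateList none (some start)
    if head.contains c then true else false

-- ===== PRECONDITION & SPEC =====
-- Pre_ excludes only the empty list, on which A raises ZeroDivisionError (idx % 0).
def Pre_ban (senateList : List String) (c : String) (idx : Int) : Prop := senateList ≠ []
instance (senateList : List String) (c : String) (idx : Int) : Decidable (Pre_ban senateList c idx) := by unfold Pre_ban; infer_instance
def pvWitness_ban : List String × String × Int := (["R", "D"], "D", 0)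

def Spec_ban (senateList : List String) (c : String) (idx : Int) (out : Bool) : Prop := out = ban_alt senateList c idx
instance (senateList : List String) (c : String) (idx : Int) (out : Bool) : Decidable (Spec_ban senateList c idx out) := by unfold Spec_ban; infer_instance

-- ===== CLAIM (what is proved, stated in full; the proofs are below) =====
def Claim_equal_ban : Prop := ∀ (senateList : List String) (c : String) (idx : Int), Dom_ban senateList c idx → Pre_ban senateList c idx → Spec_ban senateList c idx (ban senateList c idx)

-- ===== LEMMAS AND PROOFS =====

-- A's loop only ever reports elements of the list
theorem banLoop_sound (xs : List String) (c : String) (m : Int) :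
    ∀ (fuel : Nat) (p : Int), banLoop xs c m fuel p = true → c ∈ xs := by
  intro fuel
  induction fuel with
  | zero => intro p h; simp [banLoop] at h
  | succ f ih =>
    intro p h
    unfold banLoop at h
    split at h
    · rename_i h'; exact PySem.List.mem_of_pyGet?_eq_some xs h'
    · exact ih _ h

-- if c sits k steps ahead of p (circularly) and the loop has more than k steps of fuel, it finds it
theorem banLoop_complete (xs : List String) (c : String) (n : Int) (hn : 0 < n) :
    ∀ (fuel : Nat) (p : Int) (k : Nat), 0 ≤ p → p < n → k < fuel →
      PySem.List.pyGet? xs ((p + (k : Int)) % n) = some c →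
      banLoop xs c n fuel p = true := by
  intro fuel
  induction fuel with
  | zero => intro p k _ _ hk _; omega
  | succ f ih =>
    intro p k hp0 hpn hk hget
    unfold banLoop
    split
    · rfl
    · rename_i hne
      cases k with
      | zero =>
        exfalso
        have : (p + (0 : Int)) % n = p := by
          rw [add_zero]; exact Int.emod_eq_of_lt hp0 hpn
        rw [Nat.cast_zero, this] at hget
        exact hne hget
      | succ k' =>
        rw [PySem.Int.mod_eq_emod_of_pos hn]
        apply ih ((p + 1) % n) k' (Int.emod_nonneg _ (by omega)) (Int.emod_lt_of_pos _ hn) (by omega)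
        have : ((p + 1) % n + (k' : Int)) % n = (p + ((k' : Nat) + 1 : Nat)) % n := by
          rw [Int.emod_add_emod]
          congr 1
          push_cast
          ring
        rw [this]
        exact hget

-- A's return value is membership of c in the list
theorem ban_eq_mem (xs : List String) (c : String) (idx : Int) (hne : xs ≠ []) :
    ban xs c idx = true ↔ c ∈ xs := by
  have hn : (0 : Int) < (xs.length : Int) := by
    have : 0 < xs.length := List.length_pos_of_ne_nil hne
    exact_mod_cast this
  constructor
  · intro h; exact banLoop_sound xs c _ _ _ h
  · intro hmem
    obtain ⟨i, hi, hget⟩ := List.getElem_of_mem hmem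
    unfold ban
    rw [PySem.Int.mod_eq_emod_of_pos hn]
    set p : Int := idx % (xs.length : Int) with hp
    have hp0 : 0 ≤ p := Int.emod_nonneg _ (by omega)
    have hpn : p < (xs.length : Int) := Int.emod_lt_of_pos _ hn
    set kI : Int := ((i : Int) - p) % (xs.length : Int) with hkI
    have hk0 : 0 ≤ kI := Int.emod_nonneg _ (by omega)
    have hkn : kI < (xs.length : Int) := Int.emod_lt_of_pos _ hn
    apply banLoop_complete xs c _ hn xs.length p kI.toNat hp0 hpn (by omega)
    have hcast : (kI.toNat : Int) = kI := Int.toNat_of_nonneg hk0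
    have hidx : (p + (kI.toNat : Int)) % (xs.length : Int) = (i : Int) := by
      rw [hcast, hkI, add_comm, Int.emod_add_emod, sub_add_cancel]
      exact Int.emod_eq_of_lt (by omega) (by exact_mod_cast hi)
    rw [hidx, PySem.List.pyGet?_natCast, List.getElem?_eq_getElem hi, hget]

-- B's return value is membership of c in the list
theorem ban_alt_eq_mem (xs : List String) (c : String) (idx : Int) (hne : xs ≠ []) :
    ban_alt xs c idx = true ↔ c ∈ xs := by
  have hn : (0 : Int) < (xs.length : Int) := by
    have : 0 < xs.length := List.length_pos_of_ne_nil hne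
    exact_mod_cast this
  unfold ban_alt
  dsimp only
  rw [PySem.Int.mod_eq_emod_of_pos hn]
  set p : Int := idx % (xs.length : Int) with hp
  have hp0 : 0 ≤ p := Int.emod_nonneg _ (by omega)
  rw [PySem.List.slice_from _ hp0, PySem.List.slice_to _ hp0]
  have hsplit : c ∈ xs ↔ c ∈ xs.drop p.toNat ∨ c ∈ xs.take p.toNat := by
    constructor
    · intro h
      rcases List.mem_append.mp (by rw [List.take_append_drop]; exact h :
          c ∈ xs.take p.toNat ++ xs.drop p.toNat) with h | h
      · exact Or.inr h
      · exact Or.inl h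
    · rintro (h | h)
      · exact List.mem_of_mem_drop h
      · exact List.mem_of_mem_take h
  by_cases h1 : c ∈ xs.drop p.toNat
  · simp [h1, hsplit]
  · by_cases h2 : c ∈ xs.take p.toNat <;> simp [h1, h2, hsplit]

-- ===== VERDICT (by name: the statement is the Claim_ definition above) =====
theorem ban_spec : Claim_equal_ban := by
  intro xs c idx _ hpre
  unfold Spec_ban
  have h1 := ban_eq_mem xs c idx hpre
  have h2 := ban_alt_eq_mem xs c idx hpre
  cases hA : ban xs c idx <;> cases hB : ban_alt xs c idx <;> simp_all
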